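-- pv_equiv track=rewrite | github.com/pyuns2o/Algorithm | 프로그래머스/1/12948. 핸드폰 번호 가리기/핸드폰 번호 가리기.py | solution
-- ===== SOURCE A (Python) =====
-- def solution(phone_number):
--     tmp = []
--     phone_lenght = len(phone_number)
--     for i in range(phone_lenght):
--         if i < phone_lenght-4:
--             tmp.append('*')
--         else:
--             tmp.append(phone_number[i])
--
--     return ''.join(tmp)
-- ===== SOURCE B (Python) =====
-- def solution(phone_number):
--     return '*' * (len(phone_number) - 4) + phone_number[-4:]
-- ===== Notes on version B (the rewrite author's own statement) =====
-- stated objective: idiomatic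
-- what changed: Replaces the per-index branch loop that appends characters one by one with a closed-form expression: an asterisk repetition of length len-4 concatenated with the last-four-characters slice.
import Mathlib
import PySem

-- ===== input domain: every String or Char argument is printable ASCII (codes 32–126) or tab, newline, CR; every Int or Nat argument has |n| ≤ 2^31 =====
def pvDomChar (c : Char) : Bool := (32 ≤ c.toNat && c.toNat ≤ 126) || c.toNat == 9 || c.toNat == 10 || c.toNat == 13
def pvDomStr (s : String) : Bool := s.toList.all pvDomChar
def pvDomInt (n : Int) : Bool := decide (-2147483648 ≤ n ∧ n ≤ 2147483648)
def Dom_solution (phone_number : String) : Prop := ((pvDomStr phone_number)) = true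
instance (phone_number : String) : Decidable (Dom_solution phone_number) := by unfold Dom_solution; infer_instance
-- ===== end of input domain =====

-- B replaces A's per-index branch loop with a closed form: '*'-repetition of length len-4 plus the [-4:] slice (idiomatic rewrite).


-- ===== PORT A =====
-- loop over range(len), append '*' or the i-th character, then join
def solution (phone_number : String) : String :=
  let cs := phone_number.toList
  let phone_lenght : Int := cs.length
  let tmp : List Char :=
    (PySem.List.pyRange 0 phone_lenght 1).foldl
      (fun acc i =>
        if i < phone_lenght - 4 then acc ++ ['*']
        else acc ++ (PySem.List.pyGet? cs i).elim [] (fun c => [c])) []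
  String.ofList tmp

-- ===== PORT B =====
-- '*' * (len - 4) + phone_number[-4:]
def solution_alt (phone_number : String) : String :=
  let cs := phone_number.toList
  String.ofList (PySem.List.pyRepeat ['*'] ((cs.length : Int) - 4)
                 ++ PySem.List.slice cs (some (-4)) none)

-- ===== PRECONDITION & SPEC =====
def Spec_solution (phone_number : String) (out : String) : Prop := out = solution_alt phone_number
instance (phone_number : String) (out : String) : Decidable (Spec_solution phone_number out) := by unfold Spec_solution; infer_instance

-- ===== CLAIM (what is proved, stated in full; the proofs are below) =====
def Claim_equal_solution : Prop := ∀ (phone_number : String), Dom_solution phone_number → Spec_solution phone_number (solution phone_number)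

-- ===== LEMMAS AND PROOFS =====

-- the loop body, with the in-range lookup resolved, as a per-index function
theorem solution_loop_eq (cs : List Char) :
    (PySem.List.pyRange 0 (cs.length : Int) 1).foldl
      (fun acc i =>
        if i < (cs.length : Int) - 4 then acc ++ ['*']
        else acc ++ (PySem.List.pyGet? cs i).elim [] (fun c => [c])) []
    = (List.range cs.length).map
        (fun (k : Nat) => if (k : Int) < (cs.length : Int) - 4 then '*' else cs.getD k ' ') := by
  rw [PySem.List.foldl_congr_mem
      (g := fun acc (i : Int) =>
        acc ++ [if i < (cs.length : Int) - 4 then '*' else cs.getD i.toNat ' '])]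
  · rw [PySem.List.foldl_append_singleton_eq_map, List.nil_append,
      PySem.List.pyRange_zero_natCast, List.map_map]
    apply List.map_congr_left
    intro k hk
    simp at hk
    simp [hk]
  · intro acc i hi
    rw [PySem.List.mem_pyRange_one] at hi
    have h0 : 0 ≤ i := hi.1
    have hlt : i.toNat < cs.length := by omega
    split_ifs with h
    · simp
    · rw [show i = ((i.toNat : Nat) : Int) by omega, PySem.List.pyGet?_natCast]
      simp [List.getD]
      rw [show (max i 0).toNat = i.toNat by omega]
      simp [List.getElem?_eq_getElem hlt]

theorem solution_core (cs : List Char) :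
    (List.range cs.length).map
        (fun (k : Nat) => if (k : Int) < (cs.length : Int) - 4 then '*' else cs.getD k ' ')
    = List.replicate (cs.length - 4) '*' ++ cs.drop (cs.length - 4) := by
  apply List.ext_getElem
  · simp
  · intro k h1 h2
    have hk : k < cs.length := by simpa using h1
    by_cases hc : k < cs.length - 4
    · rw [List.getElem_append_left (by simpa using hc)]
      have hci : (k : Int) < (cs.length : Int) - 4 := by omega
      simp [hci]
    · have hge : cs.length - 4 ≤ k := by omega
      rw [List.getElem_append_right (by simpa using hge)]
      have : ¬ ((k : Int) < (cs.length : Int) - 4) := by omega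
      simp only [List.getElem_map, List.getElem_range, this, if_false]
      rw [List.getElem_drop]
      simp [List.getD, List.getElem?_eq_getElem hk]
      congr 1
      omega

-- ===== VERDICT =====
theorem solution_spec : Claim_equal_solution := by
  intro p _
  unfold Spec_solution solution solution_alt
  simp only [solution_loop_eq, solution_core]
  congr 1
  rw [PySem.List.pyRepeat_singleton]
  congr 1
  · congr 1; omega
  · rw [show (-4 : Int) = -((4:Nat) : Int) by norm_num,
      PySem.List.slice_from_neg_natCast _ _ (by norm_num)]
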